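-- pv_equiv track=rewrite | github.com/fisher60/Random-Scripts | Random Python/codewars/cipher.py | second_cipher
-- ===== SOURCE A (Python) =====
-- def second_cipher(phrase):
--     final = ''
--     row = 0
--     for count, char in enumerate(phrase):
--         col = count % 3
--         if char != ' ':
--             final += chr(((ord(char) - 97) + (row + col)) % 26 + 97)
--         else:
--             final += char
--         if not col and count > 0:
--             row += 1
--     return final
-- ===== SOURCE B (Python) =====
-- def second_cipher(phrase):
--     return ''.join(
--         ch if ch == ' ' else
--         chr(((ord(ch) - 97) + (0 if i == 0 else (i - 1) // 3 + i % 3)) % 26 + 97)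
--         for i, ch in enumerate(phrase)
--     )
-- ===== Notes on version B (the rewrite author's own statement) =====
-- stated objective: simpler
-- what changed: The loop-carried row accumulator is replaced by a closed-form per-index offset ((i-1)//3 + i%3, 0 at i=0), and the result is built with a single join over enumerate instead of stateful string concatenation.
import Mathlib
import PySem

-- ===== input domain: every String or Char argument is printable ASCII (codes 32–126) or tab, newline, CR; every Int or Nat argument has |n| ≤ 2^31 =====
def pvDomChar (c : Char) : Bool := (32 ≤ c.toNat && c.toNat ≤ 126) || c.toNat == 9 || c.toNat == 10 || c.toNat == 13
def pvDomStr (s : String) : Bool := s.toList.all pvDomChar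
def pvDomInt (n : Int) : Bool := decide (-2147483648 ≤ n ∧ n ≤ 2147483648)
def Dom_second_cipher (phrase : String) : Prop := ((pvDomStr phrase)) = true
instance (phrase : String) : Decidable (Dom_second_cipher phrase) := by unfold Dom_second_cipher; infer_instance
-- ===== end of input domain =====

-- B replaces A's loop-carried `row` accumulator by a closed-form per-index offset and builds
-- the output with one map over enumerate (objective: simpler).

-- ===== PORT A =====
-- A's for-loop, step for step: state = (count, row, final), one character appended per step.
def pvALoop : List Char → Int → Int → List Char → List Char
  | [], _, _, final => final
  | ch :: rest, count, row, final =>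
    let col := PySem.Int.mod count 3
    let final' :=
      if ch ≠ ' ' then
        final ++ [Char.ofNat ((PySem.Int.mod (((ch.toNat : Int) - 97) + (row + col)) 26 + 97).toNat)]
      else final ++ [ch]
    let row' := if col = 0 ∧ count > 0 then row + 1 else row
    pvALoop rest (count + 1) row' final'

def second_cipher (phrase : String) : String :=
  String.ofList (pvALoop phrase.toList 0 0 [])

-- ===== PORT B =====
def pvBShift (i : Int) : Int :=
  if i = 0 then 0 else PySem.Int.floordiv (i - 1) 3 + PySem.Int.mod i 3

def pvBChar (i : Int) (ch : Char) : Char :=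
  if ch = ' ' then ch
  else Char.ofNat ((PySem.Int.mod (((ch.toNat : Int) - 97) + pvBShift i) 26 + 97).toNat)

def second_cipher_alt (phrase : String) : String :=
  String.ofList ((PySem.List.enumerate phrase.toList).map (fun p => pvBChar p.1 p.2))

-- ===== PRECONDITION & SPEC =====
def Spec_second_cipher (phrase : String) (out : String) : Prop := out = second_cipher_alt phrase
instance (phrase : String) (out : String) : Decidable (Spec_second_cipher phrase out) := by unfold Spec_second_cipher; infer_instance

-- ===== CLAIM (what is proved, stated in full; the proofs are below) =====
def Claim_equal_second_cipher : Prop := ∀ (phrase : String), Dom_second_cipher phrase → Spec_second_cipher phrase (second_cipher phrase)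

-- ===== LEMMAS AND PROOFS =====

-- row value A's loop carries when it is about to process index s
def pvRowAt (s : Nat) : Int := if s = 0 then 0 else ((s : Int) - 1) / 3

theorem pvRowAt_succ (s : Nat) :
    (if PySem.Int.mod (s : Int) 3 = 0 ∧ (s : Int) > 0 then pvRowAt s + 1 else pvRowAt s)
      = pvRowAt (s + 1) := by
  rw [PySem.Int.mod_eq_emod_of_pos (by norm_num : (0:Int) < 3)]
  unfold pvRowAt
  rw [if_neg (Nat.succ_ne_zero s)]
  split_ifs <;> omega

theorem pvShift_eq (s : Nat) : pvRowAt s + PySem.Int.mod (s : Int) 3 = pvBShift (s : Int) := by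
  rcases Nat.eq_zero_or_pos s with h | h
  · subst h; simp [pvRowAt, pvBShift, PySem.Int.mod]
  · have h0 : ¬(s = 0) := by omega
    have h1 : ¬((s : Int) = 0) := by exact_mod_cast h0
    unfold pvRowAt pvBShift
    rw [if_neg h0, if_neg h1, PySem.Int.floordiv_eq_ediv_of_pos (by norm_num : (0:Int) < 3),
      PySem.Int.mod_eq_emod_of_pos (by norm_num : (0:Int) < 3)]

theorem pvALoop_eq (cs : List Char) : ∀ (s : Nat) (acc : List Char),
    pvALoop cs (s : Int) (pvRowAt s) acc
      = acc ++ (PySem.List.enumerate cs (s : Int)).map (fun p => pvBChar p.1 p.2) := by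
  induction cs with
  | nil => intro s acc; simp [pvALoop, PySem.List.enumerate_nil]
  | cons ch rest ih =>
    intro s acc
    rw [PySem.List.enumerate_cons]
    show pvALoop (ch :: rest) (s : Int) (pvRowAt s) acc = _
    unfold pvALoop
    dsimp only
    rw [pvRowAt_succ s]
    have hstep : ((s : Int) + 1) = ((s + 1 : Nat) : Int) := by push_cast; omega
    rw [hstep, ih (s + 1)]
    have hch : (if ch ≠ ' ' then
          acc ++ [Char.ofNat ((PySem.Int.mod (((ch.toNat : Int) - 97) + (pvRowAt s + PySem.Int.mod (s : Int) 3)) 26 + 97).toNat)]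
        else acc ++ [ch]) = acc ++ [pvBChar (s : Int) ch] := by
      rw [pvShift_eq s]
      unfold pvBChar
      split_ifs with h1 h2 <;> simp_all
    rw [hch]
    simp

-- ===== VERDICT (by name: the statement is the Claim_ definition above) =====
theorem second_cipher_spec : Claim_equal_second_cipher := by
  intro phrase _
  unfold Spec_second_cipher second_cipher second_cipher_alt
  have h := pvALoop_eq phrase.toList 0 []
  simp [pvRowAt] at h
  exact congrArg String.ofList h
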